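-- pv_equiv track=rewrite | github.com/TincyThomas/301-Days-of-Problem-Solving | Move Capital Letters to the Front.py | cap_to_front
-- ===== SOURCE A (Python) =====
-- def cap_to_front(s):
-- 	a = ""
-- 	b = ""
-- 	for i in s:
-- 		if i.isupper():
-- 			a = a + i
-- 		else:
-- 			b= b + i
-- 	return a+b
-- ===== SOURCE B (Python) =====
-- def cap_to_front(s):
--     return ''.join(sorted(s, key=lambda c: not c.isupper()))
-- ===== Notes on version B (the rewrite author's own statement) =====
-- stated objective: idiomatic
-- what changed: Replaces the two string-accumulator branches with a single stable sort keyed by non-uppercaseness, so uppercase letters (key comparing smaller) precede the rest while each group keeps its original relative order.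
import Mathlib
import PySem

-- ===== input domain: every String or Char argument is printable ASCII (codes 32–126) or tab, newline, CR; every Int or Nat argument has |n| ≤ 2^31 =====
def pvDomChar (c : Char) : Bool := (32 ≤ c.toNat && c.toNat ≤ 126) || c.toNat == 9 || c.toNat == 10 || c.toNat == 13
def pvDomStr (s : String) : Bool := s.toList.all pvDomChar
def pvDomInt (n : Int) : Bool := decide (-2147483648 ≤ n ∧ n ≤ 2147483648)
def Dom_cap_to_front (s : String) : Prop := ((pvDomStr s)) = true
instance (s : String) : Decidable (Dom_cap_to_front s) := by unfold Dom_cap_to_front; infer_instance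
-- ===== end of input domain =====

-- B replaces A's two accumulator branches by one stable sort keyed by "not isupper" (idiomatic).

-- ===== PORT A =====
-- A's loop: for i in s: append i to a if i.isupper() else to b; return a+b.
-- The two Python string accumulators are carried as List Char; String.mk at the end.
def cap_to_front (s : String) : String :=
  let st := s.toList.foldl
    (fun (ab : List Char × List Char) i =>
      if PySem.Chars.isupper i then (ab.1 ++ [i], ab.2) else (ab.1, ab.2 ++ [i]))
    ([], [])
  String.mk (st.1 ++ st.2)

-- ===== PORT B =====
-- ''.join(sorted(s, key=lambda c: not c.isupper())): PySem's stable sort with Bool key.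
def cap_to_front_alt (s : String) : String :=
  String.mk (PySem.List.sorted s.toList (fun c => !PySem.Chars.isupper c))

-- ===== PRECONDITION & SPEC =====
def Spec_cap_to_front (s : String) (out : String) : Prop := out = cap_to_front_alt s
instance (s : String) (out : String) : Decidable (Spec_cap_to_front s out) := by unfold Spec_cap_to_front; infer_instance

-- ===== CLAIM (what is proved, stated in full; the proofs are below) =====
def Claim_equal_cap_to_front : Prop := ∀ (s : String), Dom_cap_to_front s → Spec_cap_to_front s (cap_to_front s)

-- ===== LEMMAS AND PROOFS =====

-- the comparison that PySem's insertion sort uses for B's key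
def pvBefore (x y : Char) : Bool :=
  decide ((!PySem.Chars.isupper x) < (!PySem.Chars.isupper y))

theorem pvBefore_eq (x y : Char) :
    pvBefore x y = (PySem.Chars.isupper x && !PySem.Chars.isupper y) := by
  unfold pvBefore
  cases hx : PySem.Chars.isupper x <;> cases hy : PySem.Chars.isupper y <;> simp <;> decide

theorem insertBy_skip (x : Char) (as bs : List Char)
    (ha : ∀ a ∈ as, pvBefore x a = false) :
    PySem.List.insertBy pvBefore x (as ++ bs) = as ++ PySem.List.insertBy pvBefore x bs := by
  induction as with
  | nil => simp
  | cons a as ih =>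
    have h1 : pvBefore x a = false := ha a (by simp)
    have hstep : PySem.List.insertBy pvBefore x (a :: (as ++ bs))
        = a :: PySem.List.insertBy pvBefore x (as ++ bs) := by
      cases hcb : as ++ bs <;> simp [PySem.List.insertBy, h1, hcb]
    simp only [List.cons_append]
    rw [hstep, ih (fun y hy => ha y (by simp [hy]))]

theorem insertBy_front (x : Char) (bs : List Char)
    (hb : ∀ b ∈ bs, pvBefore x b = true) :
    PySem.List.insertBy pvBefore x bs = x :: bs := by
  cases bs with
  | nil => rfl
  | cons b bs' => simp [PySem.List.insertBy, hb b (by simp)]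

theorem fold_partition (l : List Char) (as bs : List Char)
    (ha : ∀ a ∈ as, PySem.Chars.isupper a = true)
    (hb : ∀ b ∈ bs, PySem.Chars.isupper b = false) :
    l.foldl (fun acc x => PySem.List.insertBy pvBefore x acc) (as ++ bs)
      = as ++ l.filter (fun c => PySem.Chars.isupper c)
        ++ bs ++ l.filter (fun c => !PySem.Chars.isupper c) := by
  induction l generalizing as bs with
  | nil => simp
  | cons x l ih =>
    simp only [List.foldl_cons, List.filter_cons]
    by_cases hx : PySem.Chars.isupper x = true
    · have hstep : PySem.List.insertBy pvBefore x (as ++ bs) = (as ++ [x]) ++ bs := by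
        rw [insertBy_skip x as bs (fun a haa => by simp [pvBefore_eq, ha a haa]),
            insertBy_front x bs (fun b hbb => by simp [pvBefore_eq, hx, hb b hbb])]
        simp
      rw [hstep, ih (as ++ [x]) bs
        (by intro a haa; rcases List.mem_append.1 haa with h | h
            · exact ha a h
            · simp at h; simpa [h] using hx)
        hb]
      simp [hx]
    · have hx' : PySem.Chars.isupper x = false := by simpa using hx
      have hstep : PySem.List.insertBy pvBefore x (as ++ bs) = as ++ (bs ++ [x]) := by
        rw [insertBy_skip x as bs (fun a haa => by simp [pvBefore_eq, hx']),
            PySem.List.insertBy_of_forall_not_before pvBefore x bs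
              (fun b hbb => by simp [pvBefore_eq, hx'])]
      rw [hstep, ih as (bs ++ [x]) ha
        (by intro b hbb; rcases List.mem_append.1 hbb with h | h
            · exact hb b h
            · simp at h; simpa [h] using hx')]
      simp [hx']

theorem foldA_partition (l : List Char) (a b : List Char) :
    l.foldl
      (fun (ab : List Char × List Char) i =>
        if PySem.Chars.isupper i then (ab.1 ++ [i], ab.2) else (ab.1, ab.2 ++ [i]))
      (a, b)
      = (a ++ l.filter (fun c => PySem.Chars.isupper c),
         b ++ l.filter (fun c => !PySem.Chars.isupper c)) := by
  induction l generalizing a b with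
  | nil => simp
  | cons x l ih =>
    simp only [List.foldl_cons, List.filter_cons]
    by_cases hx : PySem.Chars.isupper x = true <;> simp [hx, ih]

-- ===== VERDICT (by name: the statement is the Claim_ definition above) =====
theorem cap_to_front_spec : Claim_equal_cap_to_front := by
  intro s _
  show cap_to_front s = cap_to_front_alt s
  unfold cap_to_front cap_to_front_alt
  rw [PySem.List.sorted_eq_foldl_insertBy]
  have hB := fold_partition s.toList [] [] (by simp) (by simp)
  simp only [List.nil_append] at hB
  have : (List.foldl (fun acc x =>
      PySem.List.insertBy (fun a b => decide ((fun c => !PySem.Chars.isupper c) a <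
        (fun c => !PySem.Chars.isupper c) b)) x acc) [] s.toList)
      = List.foldl (fun acc x => PySem.List.insertBy pvBefore x acc) [] s.toList := rfl
  rw [this, hB, foldA_partition]
  simp
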